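-- pv_equiv track=rewrite | github.com/shibing624/synth-wiki | synth_wiki/wiki.py | _slugify_url
-- ===== SOURCE A (Python) =====
-- def _slugify_url(url: str) -> str:
--     s = url.replace("https://", "").replace("http://", "")
--     result = []
--     for c in s.lower():
--         if c.isalnum():
--             result.append(c)
--         else:
--             result.append("-")
--     slug = "".join(result)
--     while "--" in slug:
--         slug = slug.replace("--", "-")
--     slug = slug.strip("-")
--     return slug[:80]
-- ===== SOURCE B (Python) =====
-- def _slugify_url(url: str) -> str:
--     s = url.replace("https://", "").replace("http://", "")
--     out = []
--     for c in s.lower():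
--         if c.isalnum():
--             out.append(c)
--         elif not out or out[-1] != "-":
--             out.append("-")
--     return "".join(out).strip("-")[:80]
-- ===== Notes on version B (the rewrite author's own statement) =====
-- stated objective: simpler
-- what changed: B fuses A's two phases (emit a dash per non-alnum char, then a while-loop of whole-string replace passes collapsing double dashes) into one pass that appends a dash only when the last emitted char is not already a dash.
import Mathlib
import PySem

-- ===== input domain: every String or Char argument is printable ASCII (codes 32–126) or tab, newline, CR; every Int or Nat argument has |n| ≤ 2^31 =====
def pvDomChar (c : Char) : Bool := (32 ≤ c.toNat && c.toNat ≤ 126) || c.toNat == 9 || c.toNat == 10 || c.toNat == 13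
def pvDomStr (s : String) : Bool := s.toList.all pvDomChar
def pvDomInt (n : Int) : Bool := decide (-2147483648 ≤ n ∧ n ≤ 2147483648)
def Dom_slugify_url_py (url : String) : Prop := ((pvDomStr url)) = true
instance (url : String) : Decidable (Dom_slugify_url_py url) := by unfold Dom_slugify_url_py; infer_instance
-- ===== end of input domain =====

-- B: one-pass slugify that emits a dash only when the last emitted char is not a dash, replacing A's separate while-loop of dash-collapsing replace passes (simpler decomposition).

-- ===== PORT A =====
-- A-side helpers: 'slug.replace("--", "-")' acting on a char list, plus the length
-- lemmas the while-loop's termination proof cites.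

/-- One pass of `slug.replace("--", "-")` written structurally (used to reason about
    `PySem.Chars.replace` and to justify termination of the while loop). -/
def rep1 : List Char → List Char
  | [] => []
  | c :: t => if c = '-' ∧ t.head? = some '-' then '-' :: rep1 t.tail else c :: rep1 t
termination_by l => l.length
decreasing_by
  all_goals (simp; try omega)

theorem rep1_nil : rep1 [] = [] := by rw [rep1.eq_def]

theorem rep1_cons (c : Char) (t : List Char) :
    rep1 (c :: t) = if c = '-' ∧ t.head? = some '-' then '-' :: rep1 t.tail else c :: rep1 t := by
  rw [rep1.eq_def]

theorem isPrefixOf_dashdash (c : Char) (t : List Char) :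
    List.isPrefixOf ['-', '-'] (c :: t) = true ↔ c = '-' ∧ t.head? = some '-' := by
  rw [List.isPrefixOf_iff_prefix]
  cases t with
  | nil => simp
  | cons c2 t2 => simp [List.cons_prefix_cons, eq_comm]

theorem go_eq_rep1 (fuel : Nat) (l acc : List Char) (h : l.length ≤ fuel) :
    PySem.Chars.replace.go ['-', '-'] ['-'] fuel l acc = acc.reverse ++ rep1 l := by
  induction fuel generalizing l acc with
  | zero =>
    have : l = [] := List.eq_nil_of_length_eq_zero (Nat.le_zero.mp h)
    subst this; simp [PySem.Chars.replace.go, rep1_nil]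
  | succ fuel ih =>
    cases l with
    | nil => simp [PySem.Chars.replace.go, rep1_nil]
    | cons c t =>
      by_cases hp : List.isPrefixOf ['-', '-'] (c :: t) = true
      · obtain ⟨hc, hh⟩ := (isPrefixOf_dashdash c t).mp hp
        cases t with
        | nil => simp at hh
        | cons c2 t2 =>
          simp only [Option.some.injEq, List.head?_cons] at hh
          subst hc; subst hh
          rw [PySem.Chars.replace.go]
          rw [if_pos hp]
          rw [ih _ _ (by simp at h ⊢; omega)]
          rw [rep1_cons, if_pos (by simp)]
          simp
      · rw [PySem.Chars.replace.go]
        rw [if_neg (by simpa using hp)]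
        rw [ih _ _ (by simp at h ⊢; omega)]
        have hnp : ¬ (c = '-' ∧ t.head? = some '-') := by
          intro hx; exact hp ((isPrefixOf_dashdash c t).mpr hx)
        rw [rep1_cons, if_neg hnp]
        simp

theorem replace_eq_rep1 (l : List Char) :
    PySem.Chars.replace l ['-', '-'] ['-'] = rep1 l := by
  rw [PySem.Chars.replace]
  simp only [List.isEmpty_cons]
  exact go_eq_rep1 l.length l [] (le_refl _)

theorem rep1_length_le (l : List Char) : (rep1 l).length ≤ l.length := by
  fun_induction rep1 l with
  | case1 => simp
  | case2 c t h ih =>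
    rcases t with _ | ⟨c2, t2⟩
    · simp at h
    · simp only [List.tail_cons] at ih
      simp; omega
  | case3 c t h ih => simp; omega

theorem rep1_length_lt (l : List Char) (h : ['-', '-'] <:+: l) :
    (rep1 l).length < l.length := by
  fun_induction rep1 l with
  | case1 => simp at h
  | case2 c t hc ih =>
    rcases t with _ | ⟨c2, t2⟩
    · simp at hc
    · simp only [List.tail_cons]
      have := rep1_length_le t2; simp; omega
  | case3 c t hc ih =>
    rcases (List.infix_cons_iff.mp h) with hpre | hinf
    · refine absurd ?_ hc
      rw [← isPrefixOf_dashdash]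
      exact List.isPrefixOf_iff_prefix.mpr hpre
    · simp only [List.length_cons]
      exact Nat.succ_lt_succ (ih hinf)

/-- The `while "--" in slug: slug = slug.replace("--", "-")` loop of A. -/
def collapseA (cs : List Char) : List Char :=
  if PySem.Chars.isIn ['-', '-'] cs then
    collapseA (PySem.Chars.replace cs ['-', '-'] ['-'])
  else cs
termination_by cs.length
decreasing_by
  rw [replace_eq_rep1]
  exact rep1_length_lt _ ((PySem.Chars.isIn_iff_infix _ _).mp (by assumption))

def slugify_url_py (url : String) : String :=
  let s := PySem.Str.replace (PySem.Str.replace url "https://" "") "http://" ""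
  let result := (PySem.Str.lower s).toList.foldl
    (fun acc c => if PySem.Chars.isalnum c then acc ++ [c] else acc ++ ['-']) []
  let slug := collapseA result
  let slug := PySem.Chars.stripChars slug ['-']
  String.ofList (PySem.Chars.slice slug none (some 80))

-- ===== PORT B =====
def slugify_url_py_alt (url : String) : String :=
  let s := PySem.Str.replace (PySem.Str.replace url "https://" "") "http://" ""
  let out := (PySem.Str.lower s).toList.foldl
    (fun acc c =>
      if PySem.Chars.isalnum c then acc ++ [c]
      else if acc.getLast? == some '-' then acc else acc ++ ['-']) []
  String.ofList (PySem.Chars.slice (PySem.Chars.stripChars out ['-']) none (some 80))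

-- ===== PRECONDITION & SPEC =====
def Spec_slugify_url_py (url : String) (out : String) : Prop := out = slugify_url_py_alt url
instance (url : String) (out : String) : Decidable (Spec_slugify_url_py url out) := by unfold Spec_slugify_url_py; infer_instance

-- ===== CLAIM (what is proved, stated in full; the proofs are below) =====
def Claim_equal_slugify_url_py : Prop := ∀ (url : String), Dom_slugify_url_py url → Spec_slugify_url_py url (slugify_url_py url)

-- ===== LEMMAS AND PROOFS =====

/-- Canonical dash-deduplication: drop a dash whose successor is also a dash. -/
def dd : List Char → List Char
  | [] => []
  | c :: t => if c = '-' ∧ t.head? = some '-' then dd t else c :: dd t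

/-- B's loop body as a state machine over "was the last emitted char a dash". -/
def gg : Bool → List Char → List Char
  | _, [] => []
  | b, c :: t =>
    if PySem.Chars.isalnum c then c :: gg false t
    else if b then gg true t else '-' :: gg true t

theorem dd_head? (l : List Char) : (dd l).head? = l.head? := by
  induction l with
  | nil => rfl
  | cons c t ih =>
    simp only [dd]
    split
    · rename_i h; rw [ih, h.2, h.1]; rfl
    · rfl

theorem dd_cons (c : Char) (l : List Char) :
    dd (c :: l) = if c = '-' ∧ (dd l).head? = some '-' then dd l else c :: dd l := by
  rw [dd_head?]; rfl

theorem dd_rep1 (l : List Char) : dd (rep1 l) = dd l := by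
  fun_induction rep1 l with
  | case1 => rfl
  | case2 c t h ih =>
    rcases t with _ | ⟨c2, t2⟩
    · simp at h
    · obtain ⟨hc, hh⟩ := h
      simp only [Option.some.injEq, List.head?_cons] at hh
      subst hc; subst hh
      simp only [List.tail_cons] at ih ⊢
      rw [dd_cons, ih, ← dd_cons]
      have h2 : dd ('-' :: '-' :: t2) = dd ('-' :: t2) := by
        rw [dd, if_pos (by simp)]
      rw [h2]
  | case3 c t h ih =>
    rw [dd_cons, ih, ← dd_cons]

theorem dd_fix (l : List Char) (h : ¬ (['-', '-'] <:+: l)) : dd l = l := by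
  induction l with
  | nil => rfl
  | cons c t ih =>
    have hnp : ¬ (c = '-' ∧ t.head? = some '-') := by
      rintro ⟨hc, hh⟩
      rcases t with _ | ⟨c2, t2⟩
      · simp at hh
      · simp only [Option.some.injEq, List.head?_cons] at hh
        exact h (by subst hc; subst hh; exact (List.prefix_iff_eq_take.mpr rfl |>.isInfix))
    rw [dd, if_neg hnp, ih (fun hx => h (hx.trans (List.suffix_cons c t).isInfix))]

theorem collapseA_eq_dd (l : List Char) : collapseA l = dd l := by
  fun_induction collapseA l with
  | case1 l h ih =>
    rw [ih, replace_eq_rep1, dd_rep1]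
  | case2 l h =>
    rw [dd_fix l ((PySem.Chars.isIn_eq_false_iff _ _).mp (by simpa using h))]

theorem alnum_ne_dash {c : Char} (h : PySem.Chars.isalnum c = true) : c ≠ '-' := by
  intro hc; subst hc; exact absurd h (by decide)

theorem gg_dd (l : List Char) :
    dd (l.map (fun c => if PySem.Chars.isalnum c then c else '-')) = gg false l ∧
    dd ('-' :: l.map (fun c => if PySem.Chars.isalnum c then c else '-')) = '-' :: gg true l := by
  induction l with
  | nil => constructor <;> rfl
  | cons c t ih =>
    by_cases ha : PySem.Chars.isalnum c = true
    · have hc : c ≠ '-' := alnum_ne_dash ha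
      constructor
      · simp only [List.map_cons, if_pos ha]
        rw [dd, if_neg (by simp [hc]), ih.1]
        simp [gg, ha]
      · simp only [List.map_cons, if_pos ha]
        rw [dd, if_neg (by simp [hc]), dd, if_neg (by simp [hc]), ih.1]
        simp [gg, ha]
    · simp only [List.map_cons, if_neg ha]
      constructor
      · rw [ih.2]; simp [gg, ha]
      · rw [dd, if_pos (by simp), ih.2]
        simp [gg, ha]

theorem foldl_stepA (l acc : List Char) :
    l.foldl (fun acc c => if PySem.Chars.isalnum c then acc ++ [c] else acc ++ ['-']) acc
      = acc ++ l.map (fun c => if PySem.Chars.isalnum c then c else '-') := by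
  induction l generalizing acc with
  | nil => simp
  | cons c t ih =>
    simp only [List.foldl_cons, List.map_cons]
    by_cases ha : PySem.Chars.isalnum c = true <;> simp [ha, ih]

theorem foldl_stepB (l acc : List Char) :
    l.foldl (fun acc c =>
        if PySem.Chars.isalnum c then acc ++ [c]
        else if acc.getLast? == some '-' then acc else acc ++ ['-']) acc
      = acc ++ gg (acc.getLast? == some '-') l := by
  induction l generalizing acc with
  | nil => simp [gg]
  | cons c t ih =>
    simp only [List.foldl_cons]
    by_cases ha : PySem.Chars.isalnum c = true
    · rw [if_pos ha, ih]
      have : ((acc ++ [c]).getLast? == some '-') = false := by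
        simp [alnum_ne_dash ha]
      rw [this]
      simp [gg, ha]
    · rw [if_neg ha]
      by_cases hb : (acc.getLast? == some '-') = true
      · rw [if_pos hb, ih, hb]
        simp [gg, ha]
      · rw [if_neg hb, ih]
        have : ((acc ++ ['-']).getLast? == some '-') = true := by simp
        rw [this]
        simp only [Bool.not_eq_true] at hb
        rw [hb]
        simp [gg, ha]

theorem main_eq (l : List Char) :
    collapseA (l.foldl (fun acc c => if PySem.Chars.isalnum c then acc ++ [c] else acc ++ ['-']) [])
      = l.foldl (fun acc c =>
          if PySem.Chars.isalnum c then acc ++ [c]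
          else if acc.getLast? == some '-' then acc else acc ++ ['-']) [] := by
  rw [foldl_stepA, foldl_stepB]
  simp only [List.nil_append, List.getLast?_nil]
  rw [collapseA_eq_dd, (gg_dd l).1]
  rfl

-- ===== VERDICT (by name: the statement is the Claim_ definition above) =====
theorem slugify_url_py_spec : Claim_equal_slugify_url_py := by
  intro url _
  unfold Spec_slugify_url_py slugify_url_py slugify_url_py_alt
  simp only
  rw [main_eq]
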